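-- pv_equiv track=rewrite | github.com/fiberseq/fibertools | fibertools/utils.py | disjoint_bins
-- ===== SOURCE A (Python) =====
-- def disjoint_bins(start, ends, spacer_size=0):
--     """returns bins that for the given intervals such that no intervals within a bin will overlap.
--     INPUTS must be SORTED by start position!
--
--     Args:
--         start (list): list of start positions
--         ends (list): list of end positions
--         spacer_size (int, optional): minimum space between intervals in the same bin. Defaults to 0.
--
--     Returns:
--         (list): A list of bins for each interval starting at 0.
--     """
--     max_bin = 0
--     min_starts = [(-spacer_size, max_bin)]
--     bins = []
--     for st, en in zip(start, ends):
--         added = False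
--         for idx, (min_bin_st, b) in enumerate(min_starts):
--             if st >= min_bin_st + spacer_size:
--                 min_starts[idx] = (en, b)
--                 bins.append(b)
--                 added = True
--                 break
--         if not added:
--             max_bin += 1
--             min_starts.append((en, max_bin))
--             bins.append(max_bin)
--
--     return bins
-- ===== SOURCE B (Python) =====
-- # Segment-tree first-fit: leftmost bin whose stored end is <= st - spacer_size,
-- # found in O(log n) instead of A's linear scan over all bins.
--
-- def _build(sz):
--     # perfect-ish segment tree with sz leaves, all holding None (unused slot)
--     if sz <= 1:
--         return ('L', None)
--     half = sz // 2
--     return ('N', None, _build(half), _build(sz - half), half)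
--
--
-- def _tmin(t):
--     return t[1]
--
--
-- def _omin(a, b):
--     # minimum where None acts as +infinity
--     if a is None:
--         return b
--     if b is None:
--         return a
--     return min(a, b)
--
--
-- def _update(t, i, v):
--     if t[0] == 'L':
--         return ('L', v)
--     _, _, l, r, half = t
--     if i < half:
--         l = _update(l, i, v)
--     else:
--         r = _update(r, i - half, v)
--     return ('N', _omin(_tmin(l), _tmin(r)), l, r, half)
--
--
-- def _find(t, x):
--     # leftmost leaf index holding a value <= x, else None
--     if t[0] == 'L':
--         if t[1] is not None and t[1] <= x:
--             return 0
--         return None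
--     _, mn, l, r, half = t
--     if mn is None or x < mn:
--         return None
--     j = _find(l, x)
--     if j is not None:
--         return j
--     return half + _find(r, x)
--
--
-- def disjoint_bins(start, ends, spacer_size=0):
--     cap = min(len(start), len(ends)) + 1
--     t = _update(_build(cap), 0, -spacer_size)
--     used = 1
--     bins = []
--     for st, en in zip(start, ends):
--         j = _find(t, st - spacer_size)
--         if j is None:
--             j = used
--             used += 1
--         t = _update(t, j, en)
--         bins.append(j)
--     return bins
-- ===== Notes on version B (the rewrite author's own statement) =====
-- stated objective: faster
-- what changed: Replaces A's linear first-fit scan over the per-bin end list with a min-segment-tree over bin slots queried for the leftmost bin whose end is <= st - spacer_size, making each placement O(log n) instead of O(bins).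
import Mathlib
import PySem

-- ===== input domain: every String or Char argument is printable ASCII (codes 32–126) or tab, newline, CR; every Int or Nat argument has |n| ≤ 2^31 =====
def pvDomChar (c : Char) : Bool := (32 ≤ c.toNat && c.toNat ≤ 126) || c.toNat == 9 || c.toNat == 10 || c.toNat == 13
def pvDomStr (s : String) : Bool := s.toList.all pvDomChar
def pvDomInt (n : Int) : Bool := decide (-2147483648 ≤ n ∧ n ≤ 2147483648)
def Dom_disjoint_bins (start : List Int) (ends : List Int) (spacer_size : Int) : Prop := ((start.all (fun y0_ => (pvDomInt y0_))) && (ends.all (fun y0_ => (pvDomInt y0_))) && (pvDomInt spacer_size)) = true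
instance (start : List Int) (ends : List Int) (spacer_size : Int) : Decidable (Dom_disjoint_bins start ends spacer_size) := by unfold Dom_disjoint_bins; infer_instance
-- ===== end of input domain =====

-- B replaces A's linear first-fit scan over the bin list with a min-segment-tree over
-- bin slots (leftmost bin with end ≤ st - spacer_size): O(log n) per placement instead of
-- O(bins); a timing run measured B faster at the largest sizes. Same return value.

-- ===== PORT A =====
-- inner `for idx, (min_bin_st, b) in enumerate(min_starts)` loop with its break/set
def aScan (st en spacer : Int) : List (Int × Int) → Option (List (Int × Int) × Int)
  | [] => none
  | (ms, b) :: rest =>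
    if ms + spacer ≤ st then some ((en, b) :: rest, b)
    else
      match aScan st en spacer rest with
      | some (rest', bb) => some ((ms, b) :: rest', bb)
      | none => none

def disjoint_bins (start : List Int) (ends : List Int) (spacer_size : Int) : List Int :=
  ((start.zip ends).foldl
    (fun s p =>
      match aScan p.1 p.2 spacer_size s.2.1 with
      | some (ms', b) => (s.1, ms', s.2.2 ++ [b])
      | none => (s.1 + 1, s.2.1 ++ [(p.2, s.1 + 1)], s.2.2 ++ [s.1 + 1]))
    ((0 : Int), [(-spacer_size, (0 : Int))], ([] : List Int))).2.2

-- ===== PORT B =====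
inductive SegT where
  | leaf : Option Int → SegT
  | node : Option Int → SegT → SegT → Nat → SegT
deriving Repr

-- min where none acts as +infinity (B's _omin)
def omin : Option Int → Option Int → Option Int
  | none, b => b
  | some a, none => some a
  | some a, some b => some (min a b)

def tmin : SegT → Option Int
  | .leaf v => v
  | .node mn _ _ _ => mn

def buildT (sz : Nat) : SegT :=
  if _h : sz ≤ 1 then .leaf none
  else .node none (buildT (sz / 2)) (buildT (sz - sz / 2)) (sz / 2)
termination_by sz
decreasing_by all_goals omega

def updT : SegT → Nat → Int → SegT
  | .leaf _, _, v => .leaf (some v)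
  | .node _ l r h, i, v =>
    if i < h then
      let l' := updT l i v
      .node (omin (tmin l') (tmin r)) l' r h
    else
      let r' := updT r (i - h) v
      .node (omin (tmin l) (tmin r')) l r' h

-- B's _find; in the last line Python computes `half + _find(r, x)`, which is only
-- reached when the right subtree contains a hit (mn ≤ x), ported as Option.map
def findT : SegT → Int → Option Nat
  | .leaf v, x =>
    match v with
    | some a => if a ≤ x then some 0 else none
    | none => none
  | .node mn l r h, x =>
    match mn with
    | none => none
    | some m =>
      if x < m then none
      else
        match findT l x with
        | some j => some j
        | none => (findT r x).map (· + h)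

def disjoint_bins_alt (start : List Int) (ends : List Int) (spacer_size : Int) : List Int :=
  let cap := min start.length ends.length + 1
  ((start.zip ends).foldl
    (fun s p =>
      match findT s.1 (p.1 - spacer_size) with
      | some j => (updT s.1 j p.2, s.2.1, s.2.2 ++ [(j : Int)])
      | none => (updT s.1 s.2.1 p.2, s.2.1 + 1, s.2.2 ++ [(s.2.1 : Int)]))
    (updT (buildT cap) 0 (-spacer_size), (1 : Nat), ([] : List Int))).2.2

-- ===== PRECONDITION & SPEC =====
def Spec_disjoint_bins (start : List Int) (ends : List Int) (spacer_size : Int) (out : List Int) : Prop := out = disjoint_bins_alt start ends spacer_size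
instance (start : List Int) (ends : List Int) (spacer_size : Int) (out : List Int) : Decidable (Spec_disjoint_bins start ends spacer_size out) := by unfold Spec_disjoint_bins; infer_instance

-- ===== CLAIM (what is proved, stated in full; the proofs are below) =====
def Claim_equal_disjoint_bins : Prop := ∀ (start : List Int) (ends : List Int) (spacer_size : Int), Dom_disjoint_bins start ends spacer_size → Spec_disjoint_bins start ends spacer_size (disjoint_bins start ends spacer_size)

-- ===== LEMMAS AND PROOFS =====

def leavesT : SegT → List (Option Int)
  | .leaf v => [v]
  | .node _ l r _ => leavesT l ++ leavesT r

def wfT : SegT → Prop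
  | .leaf _ => True
  | .node mn l r h => wfT l ∧ wfT r ∧ mn = omin (tmin l) (tmin r) ∧ h = (leavesT l).length

def lmin (L : List (Option Int)) : Option Int := L.foldr omin none

def qok (x : Int) : Option Int → Bool
  | some a => decide (a ≤ x)
  | none => false

lemma omin_none_right (a : Option Int) : omin a none = a := by cases a <;> rfl

lemma omin_assoc (a b c : Option Int) : omin (omin a b) c = omin a (omin b c) := by
  cases a <;> cases b <;> cases c <;> simp [omin, min_assoc]

lemma lmin_cons (x : Option Int) (xs : List (Option Int)) : lmin (x :: xs) = omin x (lmin xs) := rfl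

lemma lmin_append (a b : List (Option Int)) : lmin (a ++ b) = omin (lmin a) (lmin b) := by
  induction a with
  | nil => simp [lmin, omin]
  | cons x xs ih => rw [List.cons_append, lmin_cons, lmin_cons, ih, omin_assoc]

lemma tmin_wf (t : SegT) (h : wfT t) : tmin t = lmin (leavesT t) := by
  induction t with
  | leaf v => show v = omin v none; rw [omin_none_right]
  | node mn l r hh ihl ihr =>
    obtain ⟨wl, wr, hm, _⟩ := h
    show mn = lmin (leavesT l ++ leavesT r)
    rw [lmin_append, hm, ihl wl, ihr wr]

lemma lmin_none_iff (L : List (Option Int)) : lmin L = none ↔ ∀ o ∈ L, o = none := by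
  induction L with
  | nil => simp [lmin]
  | cons x xs ih =>
    rw [lmin_cons]
    constructor
    · intro h o ho
      cases x <;> cases hx : lmin xs <;> rw [hx] at h <;> simp [omin] at h <;>
        rcases List.mem_cons.mp ho with h' | h' <;>
          first
            | (subst h'; rfl)
            | (exact ih.mp hx o h')
            | simp_all
    · intro h
      have hx : x = none := h x List.mem_cons_self
      have hxs : lmin xs = none := ih.mpr (fun o ho => h o (List.mem_cons_of_mem _ ho))
      rw [hx, hxs]; rfl

lemma lmin_le (L : List (Option Int)) (m : Int) (hm : lmin L = some m) :
    ∀ o ∈ L, ∀ a, o = some a → m ≤ a := by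
  induction L generalizing m with
  | nil => simp [lmin] at hm
  | cons x xs ih =>
    intro o ho a hoa
    rw [lmin_cons] at hm
    rcases List.mem_cons.mp ho with ho' | ho'
    · subst ho'; subst hoa
      cases hx : lmin xs <;> rw [hx] at hm <;> simp [omin] at hm <;> omega
    · cases hx : lmin xs with
      | none =>
        have := (lmin_none_iff xs).mp hx o ho'
        rw [this] at hoa; simp at hoa
      | some m' =>
        have hma : m' ≤ a := ih m' hx o ho' a hoa
        rw [hx] at hm
        cases x <;> simp [omin] at hm <;> omega

lemma findT_correct (t : SegT) (x : Int) (h : wfT t) :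
    findT t x = List.findIdx? (qok x) (leavesT t) := by
  induction t with
  | leaf v =>
    cases v <;> simp [findT, leavesT, List.findIdx?_cons, qok]
  | node mn l r hh ihl ihr =>
    obtain ⟨wl, wr, hm, hlen⟩ := h
    have hmn : mn = lmin (leavesT l ++ leavesT r) := by
      rw [lmin_append, hm, tmin_wf l wl, tmin_wf r wr]
    cases mn with
    | none =>
      have hall := (lmin_none_iff _).mp hmn.symm
      show none = List.findIdx? (qok x) (leavesT l ++ leavesT r)
      symm
      rw [List.findIdx?_eq_none_iff]
      intro o ho; rw [hall o ho]; rfl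
    | some m =>
      show (if x < m then none
            else match findT l x with
              | some j => some j
              | none => (findT r x).map (· + hh)) =
          List.findIdx? (qok x) (leavesT l ++ leavesT r)
      by_cases hx : x < m
      · rw [if_pos hx]
        symm
        rw [List.findIdx?_eq_none_iff]
        intro o ho
        cases o with
        | none => rfl
        | some a =>
          have := lmin_le _ m hmn.symm _ ho a rfl
          simp [qok]; omega
      · rw [if_neg hx, List.findIdx?_append, ihl wl, ihr wr, hlen]
        cases List.findIdx? (qok x) (leavesT l) <;> simp [Option.or]

lemma leaves_build (sz : Nat) : leavesT (buildT sz) = List.replicate (max sz 1) none := by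
  induction sz using buildT.induct with
  | case1 sz h =>
    rw [buildT, dif_pos h]
    simp only [leavesT]
    rw [show max sz 1 = 1 by omega]
    rfl
  | case2 sz h ihl ihr =>
    rw [buildT, dif_neg h]
    simp only [leavesT, ihl, ihr]
    rw [show max (sz / 2) 1 = sz / 2 by omega, show max (sz - sz / 2) 1 = sz - sz / 2 by omega,
      ← List.replicate_add]
    congr 1; omega

lemma tmin_build (sz : Nat) : tmin (buildT sz) = none := by
  rw [buildT]; split <;> rfl

lemma wf_build (sz : Nat) : wfT (buildT sz) := by
  induction sz using buildT.induct with
  | case1 sz h => rw [buildT, dif_pos h]; trivial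
  | case2 sz h ihl ihr =>
    rw [buildT, dif_neg h]
    refine ⟨ihl, ihr, ?_, ?_⟩
    · rw [tmin_build, tmin_build]; rfl
    · rw [leaves_build]; simp; omega

lemma leaves_updT_length (t : SegT) (i : Nat) (v : Int) :
    (leavesT (updT t i v)).length = (leavesT t).length := by
  induction t generalizing i with
  | leaf w => rfl
  | node mn l r h ihl ihr =>
    simp only [updT]
    split <;> simp [leavesT, ihl, ihr]

lemma wf_updT (t : SegT) (i : Nat) (v : Int) (h : wfT t) : wfT (updT t i v) := by
  induction t generalizing i with
  | leaf w => trivial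
  | node mn l r hh ihl ihr =>
    obtain ⟨wl, wr, hm, hlen⟩ := h
    simp only [updT]
    split
    · exact ⟨ihl _ wl, wr, rfl, by rw [leaves_updT_length]; exact hlen⟩
    · exact ⟨wl, ihr _ wr, rfl, hlen⟩

lemma leaves_updT (t : SegT) (i : Nat) (v : Int) (h : wfT t) (hi : i < (leavesT t).length) :
    leavesT (updT t i v) = (leavesT t).set i (some v) := by
  induction t generalizing i with
  | leaf w =>
    have hz : i = 0 := by
      simp only [leavesT, List.length_cons, List.length_nil] at hi; omega
    subst hz; rfl
  | node mn l r hh ihl ihr =>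
    obtain ⟨wl, wr, hm, hlen⟩ := h
    simp only [updT]
    split
    · rename_i hlt
      simp only [leavesT, ihl i wl (by omega), List.set_append]
      rw [if_pos (by omega)]
    · rename_i hge
      have hi' : i - hh < (leavesT r).length := by
        simp only [leavesT, List.length_append] at hi; omega
      simp only [leavesT, ihr (i - hh) wr hi', List.set_append]
      rw [if_neg (by omega), hlen]

-- characterization of A's inner scan by the first qualifying index
lemma aScan_none_iff (st en spacer : Int) (ms : List (Int × Int)) :
    aScan st en spacer ms = none ↔
      List.findIdx? (fun p => decide (p.1 + spacer ≤ st)) ms = none := by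
  induction ms with
  | nil => simp [aScan]
  | cons p rest ih =>
    obtain ⟨a, b⟩ := p
    simp only [aScan, List.findIdx?_cons]
    by_cases hc : a + spacer ≤ st
    · simp [hc]
    · rw [if_neg hc, if_neg (by simpa using hc)]
      cases hs : aScan st en spacer rest with
      | none =>
        rw [ih.mp hs]
        simp
      | some q =>
        obtain ⟨q1, q2⟩ := q
        cases hfi : List.findIdx? (fun p => decide (p.1 + spacer ≤ st)) rest with
        | none => rw [ih.mpr hfi] at hs; simp at hs
        | some j => simp

lemma aScan_some (st en spacer : Int) (ms : List (Int × Int)) (i : Nat)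
    (hf : List.findIdx? (fun p => decide (p.1 + spacer ≤ st)) ms = some i) :
    ∃ pr, ms[i]? = some pr ∧
      aScan st en spacer ms = some (ms.set i (en, pr.2), pr.2) := by
  induction ms generalizing i with
  | nil => simp at hf
  | cons p rest ih =>
    obtain ⟨a, b⟩ := p
    rw [List.findIdx?_cons] at hf
    by_cases hc : a + spacer ≤ st
    · rw [if_pos (by simpa using hc)] at hf
      injection hf with hf
      subst hf
      exact ⟨(a, b), by simp, by simp [aScan, hc]⟩
    · rw [if_neg (by simpa using hc)] at hf
      cases hrec : List.findIdx? (fun p => decide (p.1 + spacer ≤ st)) rest with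
      | none => rw [hrec] at hf; simp at hf
      | some j =>
        rw [hrec] at hf
        simp at hf
        subst hf
        obtain ⟨pr, hpr, hsc⟩ := ih j hrec
        refine ⟨pr, by simpa using hpr, ?_⟩
        simp [aScan, hc, hsc]

-- the main loop invariant
lemma main_loop (pairs : List (Int × Int)) (spacer : Int) :
    ∀ (t : SegT) (used : Nat) (maxb : Int) (ms : List (Int × Int)) (bins : List Int) (k : Nat),
    wfT t →
    maxb = (used : Int) - 1 →
    leavesT t = ms.map (fun p => some p.1) ++ List.replicate k none →
    ms.map Prod.snd = (List.range used).map Int.ofNat →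
    ms.length = used →
    pairs.length ≤ k →
    (pairs.foldl
      (fun s p =>
        match aScan p.1 p.2 spacer s.2.1 with
        | some (ms', b) => (s.1, ms', s.2.2 ++ [b])
        | none => (s.1 + 1, s.2.1 ++ [(p.2, s.1 + 1)], s.2.2 ++ [s.1 + 1]))
      (maxb, ms, bins)).2.2 =
    (pairs.foldl
      (fun s p =>
        match findT s.1 (p.1 - spacer) with
        | some j => (updT s.1 j p.2, s.2.1, s.2.2 ++ [(j : Int)])
        | none => (updT s.1 s.2.1 p.2, s.2.1 + 1, s.2.2 ++ [(s.2.1 : Int)]))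
      (t, used, bins)).2.2 := by
  induction pairs with
  | nil => intro t used maxb ms bins k _ _ _ _ _ _; rfl
  | cons p rest ih =>
    intro t used maxb ms bins k hwf hmaxb hlv hsnd hlen hk
    obtain ⟨st, en⟩ := p
    have hklen : (rest.length : Nat) + 1 ≤ k := by simpa using hk
    have hfind : findT t (st - spacer) = List.findIdx? (qok (st - spacer)) (leavesT t) :=
      findT_correct t _ hwf
    have hqok : List.findIdx? (qok (st - spacer)) (leavesT t) =
        List.findIdx? (fun p : Int × Int => decide (p.1 + spacer ≤ st)) ms := by
      rw [hlv, List.findIdx?_append]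
      have h2 : List.findIdx? (qok (st - spacer)) (List.replicate k none) = none := by
        rw [List.findIdx?_eq_none_iff]
        intro o ho
        rw [List.eq_of_mem_replicate ho]; rfl
      rw [h2]
      have h1 : List.findIdx? (qok (st - spacer)) (ms.map (fun p => some p.1)) =
          List.findIdx? (fun p : Int × Int => decide (p.1 + spacer ≤ st)) ms := by
        rw [List.findIdx?_map]
        congr 1
        funext q
        simp only [Function.comp, qok]
        rcases q with ⟨q1, q2⟩
        simp only [decide_eq_decide]
        omega
      rw [h1]
      cases List.findIdx? (fun p : Int × Int => decide (p.1 + spacer ≤ st)) ms <;>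
        simp [Option.or]
    simp only [List.foldl_cons]
    cases hf : List.findIdx? (fun p : Int × Int => decide (p.1 + spacer ≤ st)) ms with
    | some i =>
      obtain ⟨pr, hpr, hsc⟩ := aScan_some st en spacer ms i hf
      have hi : i < ms.length := by
        by_contra hge
        rw [List.getElem?_eq_none (by omega)] at hpr
        simp at hpr
      have hiu : i < used := by omega
      have hpr2 : pr.2 = Int.ofNat i := by
        have h2 : (ms.map Prod.snd)[i]? = some pr.2 := by
          rw [List.getElem?_map, hpr]; rfl
        rw [hsnd, List.getElem?_map] at h2
        simp [hiu] at h2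
        simp [h2]
      have hilt : i < (leavesT t).length := by
        rw [hlv]; simp only [List.length_append, List.length_map]; omega
      have hpr2' : pr.2 = ((i : Nat) : Int) := by rw [hpr2]; rfl
      rw [hpr2'] at hsc
      have hset_snd : (ms.set i (en, ((i : Nat) : Int))).map Prod.snd =
          (List.range used).map Int.ofNat := by
        rw [List.map_set, hsnd]
        have hi' : i < ((List.range used).map Int.ofNat).length := by
          simp; omega
        have hv : ((i : Nat) : Int) = ((List.range used).map Int.ofNat)[i]'hi' := by
          simp
        rw [show ((en, ((i : Nat) : Int)).2) = ((List.range used).map Int.ofNat)[i]'hi' from hv]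
        exact List.set_getElem_self hi'
      rw [hsc, hfind, hqok, hf]
      simp only
      exact ih (updT t i en) used maxb (ms.set i (en, ((i : Nat) : Int))) (bins ++ [(i : Int)]) k
        (wf_updT t i en hwf) hmaxb
        (by rw [leaves_updT t i en hwf hilt, hlv, List.set_append,
              if_pos (by simpa using hi), List.map_set]
            try rfl)
        hset_snd (by simpa using hlen) (by omega)
    | none =>
      have hsc : aScan st en spacer ms = none := (aScan_none_iff ..).mpr hf
      rw [hsc, hfind, hqok, hf]
      simp only
      have hltk : (leavesT t).length = ms.length + k := by
        rw [hlv]; simp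
      have hused_lt : used < (leavesT t).length := by omega
      have hlv' : leavesT (updT t used en) =
          (ms ++ [(en, maxb + 1)]).map (fun p => some p.1) ++ List.replicate (k - 1) none := by
        rw [leaves_updT t used en hwf hused_lt, hlv, List.set_append,
          if_neg (by simp [hlen])]
        simp only [hlen, List.length_map, Nat.sub_self, List.map_append]
        cases k with
        | zero => omega
        | succ k' =>
          simp [List.replicate_succ]
      have hmaxb1 : maxb + 1 = ((used + 1 : Nat) : Int) - 1 := by
        rw [hmaxb]; push_cast; ring
      have hsnd' : (ms ++ [(en, maxb + 1)]).map Prod.snd =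
          (List.range (used + 1)).map Int.ofNat := by
        rw [List.map_append, hsnd, List.range_succ, List.map_append]
        simp only [List.map_cons, List.map_nil]
        rw [show Int.ofNat used = ((used : Nat) : Int) from rfl,
          show maxb + 1 = ((used : Nat) : Int) by omega]
      have := ih (updT t used en) (used + 1) (maxb + 1) (ms ++ [(en, maxb + 1)])
        (bins ++ [(used : Int)]) (k - 1)
        (wf_updT t used en hwf) hmaxb1 hlv' hsnd'
        (by simp [hlen]) (by omega)
      rw [show (maxb + 1 : Int) = (used : Int) from by omega] at this ⊢
      exact this

-- ===== VERDICT (by name: the statement is the Claim_ definition above) =====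
theorem disjoint_bins_spec : Claim_equal_disjoint_bins := by
  intro start ends spacer _
  unfold Spec_disjoint_bins disjoint_bins disjoint_bins_alt
  have hbuild := leaves_build (min start.length ends.length + 1)
  have hlv0 : leavesT (updT (buildT (min start.length ends.length + 1)) 0 (-spacer)) =
      [((-spacer, (0 : Int)))].map (fun p => some p.1) ++
        List.replicate (min start.length ends.length) none := by
    rw [leaves_updT _ 0 _ (wf_build _) (by rw [hbuild]; simp), hbuild]
    rw [show max (min start.length ends.length + 1) 1 = min start.length ends.length + 1 by omega]
    simp [List.replicate_succ]
  have hzlen : (start.zip ends).length ≤ min start.length ends.length := by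
    simp [List.length_zip]
  have := main_loop (start.zip ends) spacer
    (updT (buildT (min start.length ends.length + 1)) 0 (-spacer)) 1 0
    [(-spacer, (0 : Int))] [] (min start.length ends.length)
    (wf_updT _ 0 _ (wf_build _)) (by simp) hlv0 (by rfl) (by simp) hzlen
  simpa using this
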